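-- pv_equiv track=rewrite | github.com/jinwooseok/coding-test | bj/Main_14501.py | cal_total
-- ===== SOURCE A (Python) =====
-- def cal_total(arr, visited):
--     i = 0
--     total=0
--     while i<len(arr):
--         if visited & (1<<i) and i+arr[i][0]<=len(arr):
--             total+=arr[i][1]
--             i+=arr[i][0]
--         else:
--             i+=1
--     return total
-- ===== SOURCE B (Python) =====
-- def cal_total(arr, visited):
--     total = 0
--     end = 0
--     for i, (d, p) in enumerate(arr):
--         if i >= end and visited & (1 << i) and i + d <= len(arr):
--             total += p
--             end = i + d
--     return total
-- ===== Notes on version B (the rewrite author's own statement) =====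
-- stated objective: alternative
-- what changed: Replaces A's jumping while-loop (the position pointer leaps past a selected task's duration) by a single fixed-step scan over all indices that carries a first-free-slot pointer `end` and selects index i only when i >= end, the bit is set and the task fits.
-- outside the precondition, e.g. on cal_total([(2, 5), (0, 1)], 3): A returns 5, B returns 5
import Mathlib
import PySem

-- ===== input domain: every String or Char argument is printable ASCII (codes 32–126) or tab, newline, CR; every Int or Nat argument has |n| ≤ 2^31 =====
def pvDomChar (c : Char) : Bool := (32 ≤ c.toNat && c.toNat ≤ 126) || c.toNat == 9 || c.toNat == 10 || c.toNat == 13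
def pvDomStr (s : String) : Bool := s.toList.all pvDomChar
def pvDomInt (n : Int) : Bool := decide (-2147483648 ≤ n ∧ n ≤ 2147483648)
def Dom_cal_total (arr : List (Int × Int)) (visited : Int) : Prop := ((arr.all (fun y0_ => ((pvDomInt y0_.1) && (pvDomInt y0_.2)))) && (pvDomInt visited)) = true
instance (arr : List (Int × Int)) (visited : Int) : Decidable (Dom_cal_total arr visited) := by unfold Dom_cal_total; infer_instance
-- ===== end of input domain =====

-- B replaces A's jumping while-loop by a fixed-step scan of all indices gated by a
-- first-free-slot pointer; same value on every input admitted by Pre_cal_total.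


-- ===== PORT A =====
-- `visited & (1 << i)` truthiness; Python raises ValueError on a negative shift count,
-- which is unreachable inside Pre_cal_total (there the loop position never goes negative).
def pyBitA (visited : Int) (i : Int) : Bool :=
  if i < 0 then false else decide (PySem.Int.band visited ((1 : Int) <<< i.toNat) ≠ 0)

-- A's `while i < len(arr)` loop; fuel only makes the loop total (outside Pre_cal_total
-- the Python loop can diverge); inside Pre_cal_total `arr.length + 1` fuel is never exhausted.
def calLoopA (arr : List (Int × Int)) (visited : Int) : Nat → Int → Int → Int
  | 0, _, total => total
  | f + 1, i, total =>
    if i < (arr.length : Int) then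
      if pyBitA visited i then
        match PySem.List.pyGet? arr i with
        | some dp =>
          if i + dp.1 ≤ (arr.length : Int) then
            calLoopA arr visited f (i + dp.1) (total + dp.2)
          else
            calLoopA arr visited f (i + 1) total
        | none => total   -- IndexError in Python; unreachable inside Pre_cal_total
      else calLoopA arr visited f (i + 1) total
    else total

def cal_total (arr : List (Int × Int)) (visited : Int) : Int :=
  calLoopA arr visited (arr.length + 1) 0 0

-- ===== PORT B =====
-- `for i, (d, p) in enumerate(arr)` with state (total, end).
def calLoopB (visited : Int) (n : Int) : List (Int × Int) → Nat → Int → Int → Int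
  | [], _, total, _ => total
  | dp :: rest, i, total, e =>
    if e ≤ (i : Int) ∧ PySem.Int.band visited ((1 : Int) <<< i) ≠ 0 ∧ (i : Int) + dp.1 ≤ n then
      calLoopB visited n rest (i + 1) (total + dp.2) ((i : Int) + dp.1)
    else
      calLoopB visited n rest (i + 1) total e

def cal_total_alt (arr : List (Int × Int)) (visited : Int) : Int :=
  calLoopB visited (arr.length : Int) arr 0 0 0

-- ===== PRECONDITION & SPEC =====
-- Pre_ excludes inputs having a selectable task of non-positive duration (bit set, fits,
-- duration ≤ 0): reaching such a task makes A loop forever or raise; if A jumps over all of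
-- them it still returns (and B agrees there), so Pre_ is slightly narrower than A's domain.
def Pre_cal_total (arr : List (Int × Int)) (visited : Int) : Prop :=
  ∀ i : Nat, i < arr.length →
    PySem.Int.band visited ((1 : Int) <<< i) ≠ 0 →
    (i : Int) + (arr.getD i (0, 0)).1 ≤ (arr.length : Int) →
    1 ≤ (arr.getD i (0, 0)).1
instance (arr : List (Int × Int)) (visited : Int) : Decidable (Pre_cal_total arr visited) := by
  unfold Pre_cal_total; infer_instance

def pvWitness_cal_total : (List (Int × Int)) × Int := ([(1, 3), (2, 5)], 3)

def Spec_cal_total (arr : List (Int × Int)) (visited : Int) (out : Int) : Prop := out = cal_total_alt arr visited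
instance (arr : List (Int × Int)) (visited : Int) (out : Int) : Decidable (Spec_cal_total arr visited out) := by unfold Spec_cal_total; infer_instance

-- ===== CLAIM (what is proved, stated in full; the proofs are below) =====
def Claim_equal_cal_total : Prop := ∀ (arr : List (Int × Int)) (visited : Int), Dom_cal_total arr visited → Pre_cal_total arr visited → Spec_cal_total arr visited (cal_total arr visited)

-- ===== LEMMAS AND PROOFS =====

-- B's loop ignores the exact value of `end` once the scan index has passed it.
theorem calLoopB_end_irrel (visited n : Int) :
    ∀ (l : List (Int × Int)) (k : Nat) (total e e' : Int),
      e ≤ (k : Int) → e' ≤ (k : Int) →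
      calLoopB visited n l k total e = calLoopB visited n l k total e' := by
  intro l
  induction l with
  | nil => intro k total e e' _ _; rfl
  | cons dp rest ih =>
    intro k total e e' he he'
    by_cases hc : PySem.Int.band visited ((1 : Int) <<< k) ≠ 0 ∧ (k : Int) + dp.1 ≤ n
    · simp only [calLoopB]
      rw [if_pos (And.intro he hc), if_pos (And.intro he' hc)]
    · have h1 : ¬ (e ≤ (k : Int) ∧ PySem.Int.band visited ((1 : Int) <<< k) ≠ 0 ∧ (k : Int) + dp.1 ≤ n) := by
        intro h; exact hc ⟨h.2.1, h.2.2⟩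
      have h2 : ¬ (e' ≤ (k : Int) ∧ PySem.Int.band visited ((1 : Int) <<< k) ≠ 0 ∧ (k : Int) + dp.1 ≤ n) := by
        intro h; exact hc ⟨h.2.1, h.2.2⟩
      simp only [calLoopB, if_neg h1, if_neg h2]
      exact ih (k + 1) total e e' (by push_cast; omega) (by push_cast; omega)

-- Indices strictly below the free-slot pointer are skipped by B's loop.
theorem calLoopB_skip (arr : List (Int × Int)) (visited : Int) :
    ∀ (g k : Nat) (total : Int), k + g ≤ arr.length →
      calLoopB visited (arr.length : Int) (arr.drop k) k total ((k + g : Nat) : Int)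
        = calLoopB visited (arr.length : Int) (arr.drop (k + g)) (k + g) total ((k + g : Nat) : Int) := by
  intro g
  induction g with
  | zero => intro k total _; rfl
  | succ g ih =>
    intro k total hle
    have hk : k < arr.length := by omega
    have hdrop : arr.drop k = arr[k] :: arr.drop (k + 1) := List.drop_eq_getElem_cons hk
    rw [hdrop]
    have hne : ¬ (((k + (g + 1) : Nat) : Int) ≤ (k : Int) ∧
        PySem.Int.band visited ((1 : Int) <<< k) ≠ 0 ∧ (k : Int) + (arr[k]).1 ≤ (arr.length : Int)) := by
      intro h; have := h.1; push_cast at this; omega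
    simp only [calLoopB, if_neg hne]
    have h1 : (k + 1) + g = k + (g + 1) := by omega
    have := ih (k + 1) total (by omega)
    rw [h1] at this
    exact this

-- Main correspondence: A's loop from position i equals B's scan of the suffix from i
-- with the free slot at i.
theorem calLoop_main (arr : List (Int × Int)) (visited : Int)
    (hp : Pre_cal_total arr visited) :
    ∀ (f : Nat) (i : Nat) (total : Int), i ≤ arr.length → arr.length - i < f →
      calLoopA arr visited f (i : Int) total
        = calLoopB visited (arr.length : Int) (arr.drop i) i total (i : Int) := by
  intro f
  induction f with
  | zero => intro i total _ h; omega
  | succ f ih =>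
    intro i total hile hfuel
    rcases lt_or_eq_of_le hile with hlt | heq
    · -- i < arr.length
      have hdrop : arr.drop i = arr[i] :: arr.drop (i + 1) := List.drop_eq_getElem_cons hlt
      have hget : PySem.List.pyGet? arr ((i : Nat) : Int) = some arr[i] := by
        rw [PySem.List.pyGet?_natCast]; simp [hlt]
      have hbitA : pyBitA visited (i : Int)
          = decide (PySem.Int.band visited ((1 : Int) <<< i) ≠ 0) := by
        simp [pyBitA]
      by_cases hbit : PySem.Int.band visited ((1 : Int) <<< i) ≠ 0
      · by_cases hfit : (i : Int) + (arr[i]).1 ≤ (arr.length : Int)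
        · -- selected: duration ≥ 1 by Pre_
          have hd1 : 1 ≤ (arr[i]).1 := by
            have := hp i hlt hbit
            rw [List.getD_eq_getElem arr (0,0) hlt] at this
            exact this hfit
          have hm : ((i : Int) + (arr[i]).1) = ((i + (arr[i]).1.toNat : Nat) : Int) := by
            push_cast; omega
          have hmle : i + (arr[i]).1.toNat ≤ arr.length := by omega
          -- A side one step
          have hA : calLoopA arr visited (f + 1) (i : Int) total
              = calLoopA arr visited f ((i : Int) + (arr[i]).1) (total + (arr[i]).2) := by
            rw [calLoopA]
            rw [if_pos (by exact_mod_cast hlt), hbitA, if_pos (by simpa using hbit), hget]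
            exact if_pos hfit
          rw [hA, hdrop]
          rw [calLoopB, if_pos ⟨le_refl _, hbit, hfit⟩]
          -- skip from i+1 up to i + d.toNat
          have hskip := calLoopB_skip arr visited ((arr[i]).1.toNat - 1) (i + 1)
            (total + (arr[i]).2) (by omega)
          have hidx : (i + 1) + ((arr[i]).1.toNat - 1) = i + (arr[i]).1.toNat := by omega
          rw [hidx] at hskip
          rw [hm, hskip]
          rw [ih (i + (arr[i]).1.toNat) (total + (arr[i]).2) hmle (by omega)]
        · -- bit set but does not fit: step by 1
          have hA : calLoopA arr visited (f + 1) (i : Int) total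
              = calLoopA arr visited f ((i : Int) + 1) total := by
            rw [calLoopA]
            rw [if_pos (by exact_mod_cast hlt), hbitA, if_pos (by simpa using hbit), hget]
            exact if_neg hfit
          rw [hA, hdrop]
          rw [calLoopB, if_neg (by intro h; exact hfit h.2.2)]
          have hcast : ((i : Int) + 1) = ((i + 1 : Nat) : Int) := by push_cast; ring
          rw [hcast, ih (i + 1) total (by omega) (by omega)]
          exact (calLoopB_end_irrel visited (arr.length : Int) (arr.drop (i + 1)) (i + 1)
            total (i : Int) ((i + 1 : Nat) : Int) (by push_cast; omega) (by push_cast; omega)).symm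
      · -- bit unset: step by 1
        have hA : calLoopA arr visited (f + 1) (i : Int) total
            = calLoopA arr visited f ((i : Int) + 1) total := by
          rw [calLoopA]
          rw [if_pos (by exact_mod_cast hlt), hbitA, if_neg (by simpa using hbit)]
        rw [hA, hdrop]
        rw [calLoopB, if_neg (by intro h; exact hbit h.2.1)]
        have hcast : ((i : Int) + 1) = ((i + 1 : Nat) : Int) := by push_cast; ring
        rw [hcast, ih (i + 1) total (by omega) (by omega)]
        exact (calLoopB_end_irrel visited (arr.length : Int) (arr.drop (i + 1)) (i + 1)
          total (i : Int) ((i + 1 : Nat) : Int) (by push_cast; omega) (by push_cast; omega)).symm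
    · -- i = arr.length: both loops return total
      subst heq
      rw [calLoopA, if_neg (by omega), List.drop_length]
      rfl

-- ===== VERDICT (by name: the statement is the Claim_ definition above) =====
theorem cal_total_spec : Claim_equal_cal_total := by
  intro arr visited _ hpre
  show cal_total arr visited = cal_total_alt arr visited
  have h := calLoop_main arr visited hpre (arr.length + 1) 0 0 (Nat.zero_le _) (by omega)
  simpa [cal_total, cal_total_alt] using h
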